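-- pv_equiv track=rewrite | github.com/anfelo/algos_python | steps/steps.py | steps_option_2
-- ===== SOURCE A (Python) =====
-- def steps_option_2(n):
--     """Write a function that accepts a positive number N.
--     The function should console log a step shape
--     with N levels using the # character.  Make sure the
--     step has spaces on the right hand side! (for loop)"""
--     step_list = []
--     for row in range(1, n + 1):
--         step_str = ''
--         for col in range(1, n + 1):
--             if col - row <= 0:
--                 step_str += '#'
--             else:
--                 step_str += ' '
--         step_list.append(step_str)
--     return step_list
-- ===== SOURCE B (Python) =====
-- def steps_option_2(n):
--     return ['#' * row + ' ' * (n - row) for row in range(1, n + 1)]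
-- ===== Notes on version B (the rewrite author's own statement) =====
-- stated objective: simpler
-- what changed: Replaced the inner per-character column loop (a branch and a string concatenation per cell) with the closed-form row string built by string repetition in a single list comprehension.
import Mathlib
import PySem

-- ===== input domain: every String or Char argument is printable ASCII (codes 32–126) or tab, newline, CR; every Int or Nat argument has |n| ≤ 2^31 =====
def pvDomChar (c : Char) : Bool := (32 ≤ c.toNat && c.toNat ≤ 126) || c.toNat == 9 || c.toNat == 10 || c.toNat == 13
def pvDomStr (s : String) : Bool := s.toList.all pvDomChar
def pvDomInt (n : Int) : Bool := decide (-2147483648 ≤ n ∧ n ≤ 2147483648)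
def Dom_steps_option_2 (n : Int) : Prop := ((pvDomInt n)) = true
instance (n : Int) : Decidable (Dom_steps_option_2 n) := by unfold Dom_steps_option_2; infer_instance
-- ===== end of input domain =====

-- B replaces the per-character inner loop (testing col-row<=0) by the closed-form row
-- string '#'*row + ' '*(n-row) in a single comprehension; objective: simpler.

-- ===== PORT A =====
def steps_option_2 (n : Int) : List String :=
  (PySem.List.pyRange 1 (n + 1) 1).foldl
    (fun step_list row =>
      step_list ++
        [(PySem.List.pyRange 1 (n + 1) 1).foldl
          (fun step_str col => if col - row ≤ 0 then step_str ++ "#" else step_str ++ " ")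
          ""])
    []

-- ===== PORT B =====
def steps_option_2_alt (n : Int) : List String :=
  (PySem.List.pyRange 1 (n + 1) 1).map
    (fun row => String.ofList (List.replicate row.toNat '#' ++ List.replicate (n - row).toNat ' '))

-- ===== PRECONDITION & SPEC =====
def Spec_steps_option_2 (n : Int) (out : List String) : Prop := out = steps_option_2_alt n
instance (n : Int) (out : List String) : Decidable (Spec_steps_option_2 n out) := by unfold Spec_steps_option_2; infer_instance

-- ===== CLAIM (what is proved, stated in full; the proofs are below) =====
def Claim_equal_steps_option_2 : Prop := ∀ (n : Int), Dom_steps_option_2 n → Spec_steps_option_2 n (steps_option_2 n)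

-- ===== LEMMAS AND PROOFS =====

-- A's inner loop, moved to the List Char level
theorem pv_toList_inner (row : Int) (l : List Int) (init : String) :
    (l.foldl (fun s col => if col - row ≤ 0 then s ++ "#" else s ++ " ") init).toList
      = l.foldl (fun s col => if col - row ≤ 0 then s ++ ['#'] else s ++ [' ']) init.toList := by
  induction l generalizing init with
  | nil => rfl
  | cons c rest ih =>
    simp only [List.foldl_cons]
    split_ifs with h <;> rw [ih] <;> simp

theorem pv_fold_all_true (row : Int) (l : List Int) (init : List Char)
    (h : ∀ c ∈ l, c - row ≤ 0) :
    l.foldl (fun s col => if col - row ≤ 0 then s ++ ['#'] else s ++ [' ']) init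
      = init ++ List.replicate l.length '#' := by
  induction l generalizing init with
  | nil => simp
  | cons c rest ih =>
    have hc : c - row ≤ 0 := h c (List.mem_cons_self ..)
    simp only [List.foldl_cons, if_pos hc]
    rw [ih _ (fun x hx => h x (List.mem_cons_of_mem _ hx))]
    simp [List.replicate_succ]

theorem pv_fold_all_false (row : Int) (l : List Int) (init : List Char)
    (h : ∀ c ∈ l, ¬ c - row ≤ 0) :
    l.foldl (fun s col => if col - row ≤ 0 then s ++ ['#'] else s ++ [' ']) init
      = init ++ List.replicate l.length ' ' := by
  induction l generalizing init with
  | nil => simp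
  | cons c rest ih =>
    have hc := h c (List.mem_cons_self ..)
    simp only [List.foldl_cons, if_neg hc]
    rw [ih _ (fun x hx => h x (List.mem_cons_of_mem _ hx))]
    simp [List.replicate_succ]

theorem pv_row_str (n row : Int) (h1 : 1 ≤ row) (h2 : row ≤ n) :
    (PySem.List.pyRange 1 (n + 1) 1).foldl
        (fun s col => if col - row ≤ 0 then s ++ "#" else s ++ " ") ""
      = String.ofList (List.replicate row.toNat '#' ++ List.replicate (n - row).toNat ' ') := by
  apply String.toList_injective
  rw [pv_toList_inner]
  rw [PySem.List.pyRange_one_append 1 (row + 1) (n + 1) (by omega) (by omega)]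
  rw [List.foldl_append]
  rw [pv_fold_all_false row _ _ (fun c hc => by
    have := (PySem.List.mem_pyRange_one.mp hc); omega)]
  rw [pv_fold_all_true row _ _ (fun c hc => by
    have := (PySem.List.mem_pyRange_one.mp hc); omega)]
  simp [PySem.List.length_pyRange_one]

theorem pv_foldl_append_map {α β : Type} (g : α → β) (l : List α) (acc : List β) :
    l.foldl (fun a x => a ++ [g x]) acc = acc ++ l.map g := by
  induction l generalizing acc with
  | nil => simp
  | cons x rest ih => simp [ih]

-- ===== VERDICT (by name: the statement is the Claim_ definition above) =====
theorem steps_option_2_spec : Claim_equal_steps_option_2 := by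
  intro n _
  unfold Spec_steps_option_2 steps_option_2 steps_option_2_alt
  rw [pv_foldl_append_map]
  simp only [List.nil_append]
  apply List.map_congr_left
  intro row hrow
  have := PySem.List.mem_pyRange_one.mp hrow
  exact pv_row_str n row (by omega) (by omega)
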